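-- pv_equiv track=rewrite | github.com/pypi-data/pypi-mirror-368 | packages/dg-nn-toolkit/dg_nn_toolkit-1.0.0-cp310-cp310-manylinux2014_x86_64.whl/hmct/compiler/model_analyze.py | format_quantized_analyze_result
-- ===== SOURCE A (Python) =====
-- from collections import Counter
--
-- def format_quantized_analyze_result(quantized_analyze_result):
--     max_node_name_len = len(max(quantized_analyze_result.keys(), key=len))
--     aligned_line_len = max_node_name_len + 5
--     pre_node_type = "CPU"
--     subgraph_num = len(quantized_analyze_result)
--     # count node num in each subgraph when iterating each node
--     subgraph_node_cnt = dict(zip(range(-1, subgraph_num), [0] * (subgraph_num + 1)))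
--     # node num in each subgraph
--     subgraph_node_num = Counter(quantized_analyze_result.values())
--     format_result = []
--     for node_name, subgraph_id in quantized_analyze_result.items():
--         node_type = "BPU" if subgraph_id >= 0 else "CPU"
--         subgraph_node_cnt[subgraph_id] += 1
--         if node_type == "BPU" and pre_node_type == "CPU":
--             pre_subgraph_id = subgraph_id
--             # insert a line to state a bpu subgraph
--             if subgraph_node_cnt[subgraph_id] == 1:
--                 head_line = "%s\n" % (
--                     "STEP INTO SUBGRAPH %d".center(aligned_line_len, "-") % subgraph_id
--                 )
--             else:
--                 head_line = "%s\n" % (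
--                     "IN SUBGRAPH %d".center(aligned_line_len, "-") % subgraph_id
--                 )
--             format_result.append(head_line)
--         elif node_type == "CPU" and pre_node_type == "BPU":
--             # each node in the subgraph has been iterated
--             if subgraph_node_cnt[pre_subgraph_id] == subgraph_node_num[pre_subgraph_id]:
--                 # insert a line to state a bpu subgraph end
--                 tail_line = "%s\n" % (
--                     "OUT OF SUBGRAPH %d".center(aligned_line_len, "-") % pre_subgraph_id
--                 )
--             else:
--                 # insert a line to state a bpu subgraph continue
--                 tail_line = "{}\n".format(
--                     "TO BE CONTINUE".center(aligned_line_len, "-")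
--                 )
--             format_result.append(tail_line)
--         # write current node type
--         format_result.append(
--             "{}: {}\n".format(node_name.ljust(max_node_name_len, " "), node_type),
--         )
--         pre_node_type = node_type
--
--     return format_result
-- ===== SOURCE B (Python) =====
-- from collections import Counter
-- from itertools import groupby
--
-- def format_quantized_analyze_result(quantized_analyze_result):
--     n = len(quantized_analyze_result)
--     width = max(len(name) for name in quantized_analyze_result)
--     line_len = width + 5
--     total = Counter(quantized_analyze_result.values())
--     # nodes seen so far per subgraph id (-1 is the CPU pool); valid ids are -1 .. n-1
--     seen = dict(zip(range(-1, n), [0] * (n + 1)))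
--     runs = [list(g) for _, g in
--             groupby(quantized_analyze_result.items(), key=lambda kv: kv[1] >= 0)]
--     out = []
--     for i, run in enumerate(runs):
--         first_id = run[0][1]
--         is_bpu = first_id >= 0
--         if is_bpu:
--             template = "STEP INTO SUBGRAPH %d" if seen[first_id] == 0 else "IN SUBGRAPH %d"
--             out.append(template.center(line_len, "-") % first_id + "\n")
--         for name, sid in run:
--             seen[sid] += 1
--             out.append(name.ljust(width) + ": " + ("BPU" if is_bpu else "CPU") + "\n")
--         if is_bpu and i + 1 < len(runs):
--             if seen[first_id] == total[first_id]:
--                 out.append("OUT OF SUBGRAPH %d".center(line_len, "-") % first_id + "\n")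
--             else:
--                 out.append("TO BE CONTINUE".center(line_len, "-") + "\n")
--     return out
-- ===== Notes on version B (the rewrite author's own statement) =====
-- stated objective: alternative
-- what changed: A is a per-node state machine threading pre_node_type/pre_subgraph_id through one loop; B first splits the items into maximal same-type runs (itertools.groupby) and emits header line, node lines and an optional tail line per run, keeping only a per-subgraph seen counter.
import Mathlib
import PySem

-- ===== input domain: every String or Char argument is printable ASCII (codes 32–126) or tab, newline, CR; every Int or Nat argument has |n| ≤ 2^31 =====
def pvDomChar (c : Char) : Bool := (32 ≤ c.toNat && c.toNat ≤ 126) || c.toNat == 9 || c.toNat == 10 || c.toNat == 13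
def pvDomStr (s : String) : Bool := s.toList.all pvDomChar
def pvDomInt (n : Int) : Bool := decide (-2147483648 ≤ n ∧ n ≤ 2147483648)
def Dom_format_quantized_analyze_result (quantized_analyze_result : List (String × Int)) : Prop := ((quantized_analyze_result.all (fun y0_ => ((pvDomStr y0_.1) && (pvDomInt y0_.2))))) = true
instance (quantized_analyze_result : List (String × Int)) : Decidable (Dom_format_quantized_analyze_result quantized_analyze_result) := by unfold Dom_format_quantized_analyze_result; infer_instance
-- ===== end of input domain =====

-- B re-decomposes A's per-node state machine into a run-based (groupby) pass; equal output is proved on Pre_ (nonempty dict, subgraph ids in [-1, len)).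

-- ----- shared string primitives (hand-ported: PySem has no center/ljust) -----

-- str.center(w, fill): exact CPython rule (extra fill char goes left iff margin and width are both odd)
def pyCenter (cs : List Char) (w : Int) (fill : Char) : List Char :=
  if w ≤ (cs.length : Int) then cs
  else
    let marg := (w - cs.length).toNat
    let left := marg / 2 + (marg &&& w.toNat &&& 1)
    List.replicate left fill ++ cs ++ List.replicate (marg - left) fill

-- str.ljust(w, fill): exact
def pyLjust (cs : List Char) (w : Int) (fill : Char) : List Char :=
  if w ≤ (cs.length : Int) then cs else cs ++ List.replicate (w - cs.length).toNat fill

-- tmpl.center(lineLen, '-') % sid + "\n"  (tmpl contains exactly one '%d' and no other '%', so %-formatting is replacement)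
def pvFmtLine (lineLen : Int) (tmpl : String) (sid : Int) : String :=
  String.ofList (PySem.Chars.replace (pyCenter tmpl.toList lineLen '-') "%d".toList (PySem.Int.toChars sid) ++ ['\n'])

-- "TO BE CONTINUE".center(lineLen, '-') + "\n"
def pvContinueLine (lineLen : Int) : String :=
  String.ofList (pyCenter "TO BE CONTINUE".toList lineLen '-' ++ ['\n'])

-- "{}: {}\n".format(name.ljust(w, " "), ty)
def pvNodeLine (w : Int) (name ty : String) : String :=
  String.ofList (pyLjust name.toList w ' ' ++ [':', ' '] ++ ty.toList ++ ['\n'])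

-- ===== PORT A =====
-- the for-loop: state = (pre_node_type, subgraph_node_cnt, pre_subgraph_id, format_result)
-- cnt reads use getD 0: exact because Pre_ keeps every subgraph_id inside the initialised key range -1..n-1
def pvLoopA (w lineLen : Int) (num : PySem.Dict Int Int) :
    List (String × Int) → String → PySem.Dict Int Int → Int → List String → List String
  | [], _, _, _, acc => acc
  | (name, sid) :: rest, preType, cnt, preId, acc =>
    let nodeType : String := if sid ≥ 0 then "BPU" else "CPU"
    let cnt' := cnt.insert sid (cnt.getD sid 0 + 1)
    let preId' := if nodeType == "BPU" && preType == "CPU" then sid else preId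
    let acc' :=
      if nodeType == "BPU" && preType == "CPU" then
        if cnt'.getD sid 0 == 1 then acc ++ [pvFmtLine lineLen "STEP INTO SUBGRAPH %d" sid]
        else acc ++ [pvFmtLine lineLen "IN SUBGRAPH %d" sid]
      else if nodeType == "CPU" && preType == "BPU" then
        if cnt'.getD preId 0 == num.getD preId 0 then acc ++ [pvFmtLine lineLen "OUT OF SUBGRAPH %d" preId]
        else acc ++ [pvContinueLine lineLen]
      else acc
    pvLoopA w lineLen num rest nodeType cnt' preId' (acc' ++ [pvNodeLine w name nodeType])

def format_quantized_analyze_result (quantized_analyze_result : List (String × Int)) : List String :=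
  -- max(keys, key=len) raises ValueError on an empty dict; Pre_ excludes it (the port's default 0 is never used inside Pre_)
  let w : Int :=
    match PySem.List.max? (quantized_analyze_result.map (·.1)) (fun s => PySem.Str.len s) with
    | some m => PySem.Str.len m
    | none => 0
  let lineLen := w + 5
  let n := quantized_analyze_result.length
  -- dict(zip(range(-1, n), [0] * (n + 1)))
  let cnt0 := (PySem.List.pyRange (-1) (n : Int)).foldl (fun d k => d.insert k (0 : Int)) PySem.Dict.empty
  let num := PySem.Dict.counter (quantized_analyze_result.map (·.2))
  -- pre_subgraph_id starts unassigned in Python; it is never read before its first assignment, 0 is a placeholder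
  pvLoopA w lineLen num quantized_analyze_result "CPU" cnt0 0 []

-- ===== PORT B =====
-- itertools.groupby(items, key=lambda kv: kv[1] >= 0): the list of maximal same-type runs
def pvRuns : List (String × Int) → List (List (String × Int))
  | [] => []
  | x :: xs =>
    match pvRuns xs with
    | [] => [[x]]
    | r :: rs =>
      match r with
      | [] => [x] :: rs   -- unreachable: pvRuns never yields an empty run
      | y :: _ => if decide (0 ≤ y.2) == decide (0 ≤ x.2) then (x :: r) :: rs else [x] :: r :: rs

-- the inner 'for name, sid in run' loop: node lines for one run, threading the seen counter
-- seen reads use getD 0: exact because Pre_ keeps every subgraph_id inside the initialised key range -1..n-1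
def pvRunNodes (w : Int) (ty : String) :
    List (String × Int) → PySem.Dict Int Int → List String × PySem.Dict Int Int
  | [], seen => ([], seen)
  | (name, sid) :: rest, seen =>
    let seen' := seen.insert sid (seen.getD sid 0 + 1)
    let (ls, sf) := pvRunNodes w ty rest seen'
    (pvNodeLine w name ty :: ls, sf)

def pvLoopB (w lineLen : Int) (total : PySem.Dict Int Int) :
    List (List (String × Int)) → PySem.Dict Int Int → List String
  | [], _ => []
  | run :: rest, seen =>
    match run with
    | [] => pvLoopB w lineLen total rest seen   -- unreachable: groupby never yields an empty run
    | (_, id0) :: _ =>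
      let head :=
        if 0 ≤ id0 then
          [if seen.getD id0 0 == 0 then pvFmtLine lineLen "STEP INTO SUBGRAPH %d" id0
           else pvFmtLine lineLen "IN SUBGRAPH %d" id0]
        else []
      let bs := pvRunNodes w (if 0 ≤ id0 then "BPU" else "CPU") run seen
      let tail :=
        if 0 ≤ id0 && !rest.isEmpty then
          if bs.2.getD id0 0 == total.getD id0 0 then [pvFmtLine lineLen "OUT OF SUBGRAPH %d" id0]
          else [pvContinueLine lineLen]
        else []
      head ++ bs.1 ++ tail ++ pvLoopB w lineLen total rest bs.2

def format_quantized_analyze_result_alt (quantized_analyze_result : List (String × Int)) : List String :=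
  -- max(len(name) for name in d) raises ValueError on an empty dict; Pre_ excludes it
  let w : Int :=
    match quantized_analyze_result.map (·.1) with
    | [] => 0
    | nm :: rest => rest.foldl (fun m s => max m (PySem.Str.len s)) (PySem.Str.len nm)
  let lineLen := w + 5
  let n := quantized_analyze_result.length
  let total := PySem.Dict.counter (quantized_analyze_result.map (·.2))
  -- dict(zip(range(-1, n), [0] * (n + 1)))
  let seen0 := (PySem.List.pyRange (-1) (n : Int)).foldl (fun d k => d.insert k (0 : Int)) PySem.Dict.empty
  pvLoopB w lineLen total (pvRuns quantized_analyze_result) seen0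

-- ===== PRECONDITION & SPEC =====
-- exactly where Python A returns: a nonempty dict (else ValueError from max) whose subgraph ids
-- lie in the initialised key range -1..len-1 (else KeyError on subgraph_node_cnt[subgraph_id])
def Pre_format_quantized_analyze_result (quantized_analyze_result : List (String × Int)) : Prop :=
  quantized_analyze_result ≠ [] ∧
    ∀ p ∈ quantized_analyze_result, -1 ≤ p.2 ∧ p.2 < quantized_analyze_result.length
instance (quantized_analyze_result : List (String × Int)) : Decidable (Pre_format_quantized_analyze_result quantized_analyze_result) := by unfold Pre_format_quantized_analyze_result; infer_instance

def pvWitness_format_quantized_analyze_result : (List (String × Int)) :=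
  [("conv1", 0), ("softmax", -1), ("conv2", 0), ("fc", 1)]

def Spec_format_quantized_analyze_result (quantized_analyze_result : List (String × Int)) (out : List String) : Prop := out = format_quantized_analyze_result_alt quantized_analyze_result
instance (quantized_analyze_result : List (String × Int)) (out : List String) : Decidable (Spec_format_quantized_analyze_result quantized_analyze_result out) := by unfold Spec_format_quantized_analyze_result; infer_instance

-- ===== CLAIM (what is proved, stated in full; the proofs are below) =====
def Claim_equal_format_quantized_analyze_result : Prop := ∀ (quantized_analyze_result : List (String × Int)), Dom_format_quantized_analyze_result quantized_analyze_result → Pre_format_quantized_analyze_result quantized_analyze_result → Spec_format_quantized_analyze_result quantized_analyze_result (format_quantized_analyze_result quantized_analyze_result)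

-- ===== LEMMAS AND PROOFS =====

def pvInc (cnt : PySem.Dict Int Int) (run : List (String × Int)) : PySem.Dict Int Int :=
  run.foldl (fun d p => d.insert p.2 (d.getD p.2 0 + 1)) cnt

lemma pvInc_getD (cnt : PySem.Dict Int Int) (run : List (String × Int)) (k : Int) :
    (pvInc cnt run).getD k 0 = cnt.getD k 0 + ((run.map (·.2)).count k : Int) := by
  unfold pvInc
  rw [← PySem.Dict.getD_foldl_insert_add_one (run.map (·.2)) cnt k, List.foldl_map]

lemma pvRunNodes_eq (w : Int) (ty : String) (run : List (String × Int)) (seen : PySem.Dict Int Int) :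
    pvRunNodes w ty run seen = (run.map (fun p => pvNodeLine w p.1 ty), pvInc seen run) := by
  induction run generalizing seen with
  | nil => simp [pvRunNodes, pvInc]
  | cons x t ih => simp [pvRunNodes, pvInc, ih, List.foldl_cons]

-- pvRuns computes the maximal same-type runs: groupby characterised by takeWhile/dropWhile
lemma pvRuns_cons (x : String × Int) (tl : List (String × Int)) :
    pvRuns (x :: tl)
      = (x :: tl.takeWhile (fun y => decide (0 ≤ y.2) == decide (0 ≤ x.2))) ::
          pvRuns (tl.dropWhile (fun y => decide (0 ≤ y.2) == decide (0 ≤ x.2))) := by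
  induction tl generalizing x with
  | nil => rfl
  | cons y tl' ih =>
      by_cases hxy : decide (0 ≤ y.2) == decide (0 ≤ x.2)
      · have hpq : (fun z : String × Int => decide (0 ≤ z.2) == decide (0 ≤ y.2))
            = (fun z : String × Int => decide (0 ≤ z.2) == decide (0 ≤ x.2)) := by
          funext z
          rw [show decide (0 ≤ y.2) = decide (0 ≤ x.2) from by simpa using hxy]
        show (match pvRuns (y :: tl') with
          | [] => [[x]]
          | r :: rs =>
            match r with
            | [] => [x] :: rs
            | z :: _ => if decide (0 ≤ z.2) == decide (0 ≤ x.2) then (x :: r) :: rs else [x] :: r :: rs) = _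
        rw [ih y, hpq]
        simp [hxy]
      · show (match pvRuns (y :: tl') with
          | [] => [[x]]
          | r :: rs =>
            match r with
            | [] => [x] :: rs
            | z :: _ => if decide (0 ≤ z.2) == decide (0 ≤ x.2) then (x :: r) :: rs else [x] :: r :: rs) = _
        rw [ih y]
        simp only [List.takeWhile_cons, List.dropWhile_cons, hxy]
        simp only [Bool.false_eq_true, if_false]
        rw [← ih y]

lemma L_cpu (w l : Int) (num : PySem.Dict Int Int) (run : List (String × Int))
    (h : ∀ p ∈ run, p.2 < 0) :
    ∀ rest cnt preId acc,
      pvLoopA w l num (run ++ rest) "CPU" cnt preId acc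
        = pvLoopA w l num rest "CPU" (pvInc cnt run) preId
            (acc ++ run.map (fun p => pvNodeLine w p.1 "CPU")) := by
  induction run with
  | nil => intro rest cnt preId acc; simp [pvInc]
  | cons x t ih =>
      intro rest cnt preId acc
      obtain ⟨name, sid⟩ := x
      have hs : ¬ sid ≥ 0 := by have := h _ (List.mem_cons_self); omega
      simp only [List.cons_append, pvLoopA, if_neg hs]
      rw [ih (fun p hp => h p (List.mem_cons_of_mem _ hp))]
      simp [pvInc, List.foldl_cons]

lemma L_bpu (w l : Int) (num : PySem.Dict Int Int) (run : List (String × Int))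
    (h : ∀ p ∈ run, 0 ≤ p.2) :
    ∀ rest cnt preId acc,
      pvLoopA w l num (run ++ rest) "BPU" cnt preId acc
        = pvLoopA w l num rest "BPU" (pvInc cnt run) preId
            (acc ++ run.map (fun p => pvNodeLine w p.1 "BPU")) := by
  induction run with
  | nil => intro rest cnt preId acc; simp [pvInc]
  | cons x t ih =>
      intro rest cnt preId acc
      obtain ⟨name, sid⟩ := x
      have hs : sid ≥ 0 := h _ (List.mem_cons_self)
      simp only [List.cons_append, pvLoopA, if_pos hs]
      rw [ih (fun p hp => h p (List.mem_cons_of_mem _ hp))]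
      simp [pvInc, List.foldl_cons]

lemma L_tail (w l : Int) (num : PySem.Dict Int Int) (n1 : String) (id1 : Int)
    (rest₂ : List (String × Int)) (cnt : PySem.Dict Int Int) (preId : Int) (acc : List String)
    (h1 : id1 < 0) (h2 : 0 ≤ preId) :
    pvLoopA w l num ((n1, id1) :: rest₂) "BPU" cnt preId acc
      = pvLoopA w l num ((n1, id1) :: rest₂) "CPU" cnt preId
          (acc ++ [if cnt.getD preId 0 == num.getD preId 0 then pvFmtLine l "OUT OF SUBGRAPH %d" preId
                   else pvContinueLine l]) := by
  have hs : ¬ id1 ≥ 0 := by omega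
  have hne : preId ≠ id1 := by omega
  simp only [pvLoopA, if_neg hs]
  simp [PySem.Dict.getD_insert, hne]
  split <;> simp

lemma L_main (w l : Int) (num : PySem.Dict Int Int) :
    ∀ (N : Nat) (xs : List (String × Int)), xs.length ≤ N →
    ∀ (cnt seen : PySem.Dict Int Int) (preId : Int) (acc : List String),
      (∀ k : Int, 0 ≤ k → cnt.getD k 0 = seen.getD k 0) →
      pvLoopA w l num xs "CPU" cnt preId acc = acc ++ pvLoopB w l num (pvRuns xs) seen := by
  intro N
  induction N with
  | zero =>
      intro xs hx cnt seen preId acc H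
      have : xs = [] := List.length_eq_zero_iff.mp (Nat.le_zero.mp hx)
      subst this; simp [pvLoopA, pvRuns, pvLoopB]
  | succ N ih =>
      intro xs hx cnt seen preId acc H
      match xs with
      | [] => simp [pvLoopA, pvRuns, pvLoopB]
      | (n0, id0) :: tl =>
        simp only [List.length_cons, Nat.add_le_add_iff_right] at hx
        set p : String × Int → Bool := fun y => decide (0 ≤ y.2) == decide (0 ≤ (n0, id0).2) with hp
        have hsplit : tl.takeWhile p ++ tl.dropWhile p = tl := List.takeWhile_append_dropWhile
        have hruns : pvRuns ((n0, id0) :: tl)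
            = ((n0, id0) :: tl.takeWhile p) :: pvRuns (tl.dropWhile p) := pvRuns_cons _ tl
        have hlen : (tl.dropWhile p).length ≤ N :=
          le_trans (List.length_dropWhile_le _ _) hx
        by_cases h0 : 0 ≤ id0
        · -- BPU run
          have hrun' : ∀ q ∈ tl.takeWhile p, 0 ≤ q.2 := by
            intro q hq
            have := List.mem_takeWhile_imp hq
            simp [hp, h0] at this
            exact this
          -- A: first node
          have hstep : pvLoopA w l num ((n0, id0) :: tl) "CPU" cnt preId acc
              = pvLoopA w l num tl "BPU" (cnt.insert id0 (cnt.getD id0 0 + 1)) id0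
                  ((if ((cnt.getD id0 0 + 1 : Int) == 1) then
                      acc ++ [pvFmtLine l "STEP INTO SUBGRAPH %d" id0]
                    else acc ++ [pvFmtLine l "IN SUBGRAPH %d" id0]) ++ [pvNodeLine w n0 "BPU"]) := by
            simp only [pvLoopA]
            simp [h0]
          rw [hstep]
          conv_lhs => rw [← hsplit]
          rw [L_bpu w l num _ hrun']
          have hcnt1 : pvInc (cnt.insert id0 (cnt.getD id0 0 + 1)) (tl.takeWhile p)
              = pvInc cnt ((n0, id0) :: tl.takeWhile p) := by
            simp [pvInc]
          rw [hcnt1, hruns]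
          have hcond : ((cnt.getD id0 0 + 1 : Int) == 1) = ((seen.getD id0 0 : Int) == 0) := by
            have hx0 := H id0 h0
            by_cases hz : seen.getD id0 0 = 0
            · simp [hz, hx0]
            · simp [hz, hx0]
          have Hinc : ∀ k : Int, 0 ≤ k →
              (pvInc cnt ((n0, id0) :: tl.takeWhile p)).getD k 0
                = (pvInc seen ((n0, id0) :: tl.takeWhile p)).getD k 0 := by
            intro k hk
            rw [pvInc_getD, pvInc_getD, H k hk]
          cases hrest : tl.dropWhile p with
          | nil =>
              simp only [pvLoopB, pvRunNodes_eq, pvRuns, List.isEmpty_nil, if_pos h0]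
              simp only [pvLoopA]
              rw [hcond]
              split <;> simp
          | cons y rest₂ =>
              obtain ⟨n1, id1⟩ := y
              have hid1 : id1 < 0 := by
                have hh := List.head?_dropWhile_not p tl
                rw [hrest] at hh
                simp [hp, h0] at hh
                omega
              rw [L_tail w l num n1 id1 rest₂ _ id0 _ hid1 h0,
                  ih _ (hrest ▸ hlen) _ _ id0 _ Hinc, pvRuns_cons (n1, id1) rest₂]
              simp only [pvLoopB, pvRunNodes_eq, if_pos h0, List.isEmpty_cons]
              rw [hcond, Hinc id0 h0]
              split <;> split <;> simp [h0]
        · -- CPU run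
          have hneg : ∀ q ∈ (n0, id0) :: tl.takeWhile p, q.2 < 0 := by
            intro q hq
            rcases List.mem_cons.mp hq with h | h
            · subst h; simpa using by omega
            · have := List.mem_takeWhile_imp h
              simp [hp, h0] at this
              omega
          have H' : ∀ k : Int, 0 ≤ k →
              (pvInc cnt ((n0, id0) :: tl.takeWhile p)).getD k 0
                = (pvInc seen ((n0, id0) :: tl.takeWhile p)).getD k 0 := by
            intro k hk
            rw [pvInc_getD, pvInc_getD, H k hk]
          conv_lhs => rw [show (n0, id0) :: tl
              = ((n0, id0) :: tl.takeWhile p) ++ tl.dropWhile p from by rw [List.cons_append, hsplit]]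
          rw [L_cpu w l num _ hneg, ih _ hlen _ _ preId _ H', hruns]
          have h0' : ¬ (0 : Int) ≤ id0 := h0
          simp only [pvLoopB, pvRunNodes_eq, if_neg h0']
          simp [h0']

lemma width_eq (x : String) (t : List String) :
    (match PySem.List.max? (x :: t) (fun s => PySem.Str.len s) with
     | some m => PySem.Str.len m
     | none => 0)
    = t.foldl (fun m s => max m (PySem.Str.len s)) (PySem.Str.len x) := by
  cases h : PySem.List.max? (x :: t) (fun s => PySem.Str.len s) with
  | none => exact absurd ((PySem.List.max?_eq_none_iff _ _).mp h) (by simp)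
  | some m =>
      have hmem := PySem.List.max?_mem h
      have hmax := PySem.List.max?_isMax h
      rw [show t.foldl (fun m s => max m (PySem.Str.len s)) (PySem.Str.len x)
          = (t.map PySem.Str.len).foldl max (PySem.Str.len x) from (List.foldl_map).symm]
      have h1 : PySem.Str.len m ≤ (t.map PySem.Str.len).foldl max (PySem.Str.len x) := by
        rcases List.mem_cons.mp hmem with rfl | hm
        · exact (PySem.List.le_foldl_max _ _).1
        · exact (PySem.List.le_foldl_max _ _).2 _ (List.mem_map_of_mem hm)
      have h2 : (t.map PySem.Str.len).foldl max (PySem.Str.len x) ≤ PySem.Str.len m := by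
        have hFmem := PySem.List.max?_mem (PySem.List.max?_id_cons (PySem.Str.len x) (t.map PySem.Str.len))
        rcases List.mem_cons.mp hFmem with hF | hF
        · rw [hF]; exact hmax x List.mem_cons_self
        · obtain ⟨y, hy, hyF⟩ := List.mem_map.mp hF
          rw [← hyF]; exact hmax y (List.mem_cons_of_mem _ hy)
      exact le_antisymm h1 h2


-- ===== VERDICT (by name: the statement is the Claim_ definition above) =====
theorem format_quantized_analyze_result_spec : Claim_equal_format_quantized_analyze_result := by
  unfold Claim_equal_format_quantized_analyze_result
  intro xs _ hpre
  unfold Spec_format_quantized_analyze_result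
  obtain ⟨hne, -⟩ := hpre
  cases xs with
  | nil => exact absurd rfl hne
  | cons x tl =>
      unfold format_quantized_analyze_result format_quantized_analyze_result_alt
      simp only [List.map_cons]
      rw [width_eq x.1 (tl.map (·.1))]
      exact L_main _ _ _ (x :: tl).length _ le_rfl _ _ _ _ (fun k _ => rfl)
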